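-- pv_equiv track=rewrite | github.com/Artinto/2024-1_study | [코딩테스트]/[위클리 챌린지]/[부족한 금액 계산하기]/부족한_금액_계산하기.py | solution
-- ===== SOURCE A (Python) =====
-- def solution(price, money, count):
--     total = 0
--     for i in range(1, count+1):
--         total += i * price
--     if (total - money) > 0:
--         return total - money
--     else:
--         return 0
-- ===== SOURCE B (Python) =====
-- def solution(price, money, count):
--     n = count if count > 0 else 0
--     total = price * n * (n + 1) // 2
--     shortfall = total - money
--     return shortfall if shortfall > 0 else 0
-- ===== Notes on version B (the rewrite author's own statement) =====
-- stated objective: faster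
-- what changed: Replaces the O(count) loop summing i*price with the arithmetic-series closed form price*n*(n+1)//2 computed in O(1).
import Mathlib
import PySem

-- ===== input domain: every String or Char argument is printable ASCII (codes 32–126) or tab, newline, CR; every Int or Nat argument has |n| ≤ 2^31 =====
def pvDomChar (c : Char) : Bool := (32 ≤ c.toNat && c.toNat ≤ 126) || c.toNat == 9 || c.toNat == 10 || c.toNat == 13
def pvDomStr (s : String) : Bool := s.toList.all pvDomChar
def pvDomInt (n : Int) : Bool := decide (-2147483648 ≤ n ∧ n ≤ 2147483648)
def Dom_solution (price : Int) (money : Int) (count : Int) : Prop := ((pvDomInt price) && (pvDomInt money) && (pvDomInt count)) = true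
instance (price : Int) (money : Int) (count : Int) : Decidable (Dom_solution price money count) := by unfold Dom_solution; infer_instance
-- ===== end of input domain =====

-- B replaces the O(count) summation loop with the arithmetic-series closed form price*n*(n+1)//2 (objective: faster, asymptotic).
-- ===== PORT A =====
def solution (price : Int) (money : Int) (count : Int) : Int :=
  let total := (PySem.List.pyRange 1 (count + 1) 1).foldl (fun total i => total + i * price) 0
  if total - money > 0 then total - money else 0

-- ===== PORT B =====
def solution_alt (price : Int) (money : Int) (count : Int) : Int :=
  let n : Int := if count > 0 then count else 0
  let total := PySem.Int.floordiv (price * n * (n + 1)) 2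
  let shortfall := total - money
  if shortfall > 0 then shortfall else 0

-- ===== PRECONDITION & SPEC =====
def Spec_solution (price : Int) (money : Int) (count : Int) (out : Int) : Prop := out = solution_alt price money count
instance (price : Int) (money : Int) (count : Int) (out : Int) : Decidable (Spec_solution price money count out) := by unfold Spec_solution; infer_instance

-- ===== CLAIM (what is proved, stated in full; the proofs are below) =====
def Claim_equal_solution : Prop := ∀ (price : Int) (money : Int) (count : Int), Dom_solution price money count → Spec_solution price money count (solution price money count)

-- ===== LEMMAS AND PROOFS =====

-- triangular numbers, defined recursively (the value of the closed form's division)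
def pvTri : Nat → Int
  | 0 => 0
  | n + 1 => pvTri n + (n + 1)

-- the loop of A computes price * triangular(n)
theorem pvFold_tri (price : Int) (n : Nat) (init : Int) :
    (PySem.List.pyRange 1 ((n : Int) + 1) 1).foldl (fun t i => t + i * price) init
      = init + price * pvTri n := by
  induction n generalizing init with
  | zero => simp [PySem.List.pyRange_one_eq_nil, pvTri]
  | succ n ih =>
    have hsplit : PySem.List.pyRange 1 (((n : Int) + 1) + 1) 1
        = PySem.List.pyRange 1 ((n : Int) + 1) 1 ++ [(n : Int) + 1] :=
      PySem.List.pyRange_one_succ_right (by omega)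
    have hcast : ((n + 1 : Nat) : Int) + 1 = ((n : Int) + 1) + 1 := by push_cast; ring
    rw [hcast, hsplit, List.foldl_append, ih]
    simp only [List.foldl_cons, List.foldl_nil, pvTri]; ring

theorem pvTwoTri (n : Nat) : ((n : Int)) * ((n : Int) + 1) = 2 * pvTri n := by
  induction n with
  | zero => simp [pvTri]
  | succ n ih =>
    simp only [pvTri]
    push_cast
    push_cast at ih
    nlinarith [ih]

-- ===== VERDICT (by name: the statement is the Claim_ definition above) =====
theorem solution_spec : Claim_equal_solution := by
  intro price money count _
  unfold Spec_solution solution solution_alt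
  by_cases hc : count > 0
  · have hcn : ((count.toNat : Nat) : Int) = count := Int.toNat_of_nonneg (by omega)
    have hfold := pvFold_tri price count.toNat 0
    rw [hcn] at hfold
    have heven : price * count * (count + 1) = 2 * (price * pvTri count.toNat) := by
      have := pvTwoTri count.toNat; rw [hcn] at this
      calc price * count * (count + 1) = price * (count * (count + 1)) := by ring
        _ = 2 * (price * pvTri count.toNat) := by rw [this]; ring
    simp only [hfold, if_pos hc, PySem.Int.floordiv, heven, zero_add]
    rw [Int.mul_fdiv_cancel_left _ (by norm_num)]
  · have hnil : PySem.List.pyRange 1 (count + 1) 1 = [] :=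
      PySem.List.pyRange_one_eq_nil (by omega)
    simp [hnil, if_neg hc, PySem.Int.floordiv]
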